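-- pv_equiv track=rewrite | github.com/KokosTech/Python-Classwork | Python_Test_2/calculate.py | profits
-- ===== SOURCE A (Python) =====
-- def profits(days):
--     profit = 0
--     daily_profit = 200
--
--     for day in range(1, days+1):
--         if day < 14:
--             profit += daily_profit
--         elif 14 <= day < 30:
--             profit += daily_profit + 50
--         elif 30 <= day < 60:
--             profit += daily_profit + 80
--         elif day >= 60:
--             profit += daily_profit + 100
--
--     return profit
-- ===== SOURCE B (Python) =====
-- def profits(days):
--     n = max(days, 0)
--     c13 = min(n, 13)
--     c29 = min(n, 29)
--     c59 = min(n, 59)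
--     return 200 * c13 + 250 * (c29 - c13) + 280 * (c59 - c29) + 300 * (n - c59)
-- ===== Notes on version B (the rewrite author's own statement) =====
-- stated objective: faster
-- what changed: Replaced the day-by-day loop with a closed form that counts the days in each rate tier by clamping and multiplies by the tier rate.
import Mathlib
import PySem

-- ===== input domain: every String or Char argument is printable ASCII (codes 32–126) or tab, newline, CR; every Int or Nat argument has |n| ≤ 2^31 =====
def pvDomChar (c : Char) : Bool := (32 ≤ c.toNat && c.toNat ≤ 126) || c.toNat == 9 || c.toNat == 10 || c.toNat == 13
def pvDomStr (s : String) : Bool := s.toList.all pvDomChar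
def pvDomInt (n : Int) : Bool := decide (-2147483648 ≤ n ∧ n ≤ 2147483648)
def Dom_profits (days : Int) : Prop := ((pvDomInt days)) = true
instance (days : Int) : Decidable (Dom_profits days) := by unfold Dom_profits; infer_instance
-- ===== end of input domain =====

-- B replaces A's day-by-day loop by an O(1) closed form counting the days in each rate tier via clamping.


-- ===== PORT A =====
def profits (days : Int) : Int :=
  (PySem.List.pyRange 1 (days + 1) 1).foldl
    (fun profit day =>
      if day < 14 then profit + 200
      else if 14 ≤ day ∧ day < 30 then profit + (200 + 50)
      else if 30 ≤ day ∧ day < 60 then profit + (200 + 80)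
      else if day ≥ 60 then profit + (200 + 100)
      else profit) 0

-- ===== PORT B =====
def profits_alt (days : Int) : Int :=
  let n := max days 0
  let c13 := min n 13
  let c29 := min n 29
  let c59 := min n 59
  200 * c13 + 250 * (c29 - c13) + 280 * (c59 - c29) + 300 * (n - c59)

-- ===== PRECONDITION & SPEC =====
def Spec_profits (days : Int) (out : Int) : Prop := out = profits_alt days
instance (days : Int) (out : Int) : Decidable (Spec_profits days out) := by unfold Spec_profits; infer_instance

-- ===== CLAIM (what is proved, stated in full; the proofs are below) =====
def Claim_equal_profits : Prop := ∀ (days : Int), Dom_profits days → Spec_profits days (profits days)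

-- ===== LEMMAS AND PROOFS =====

theorem profits_nat : ∀ (N : Nat), profits (N : Int) = profits_alt (N : Int) := by
  intro N
  induction N with
  | zero =>
      simp [profits, profits_alt, PySem.List.pyRange_one_eq_nil]
  | succ n ih =>
      have h : PySem.List.pyRange 1 ((n : Int) + 1 + 1) 1
          = PySem.List.pyRange 1 ((n : Int) + 1) 1 ++ [(n : Int) + 1] := by
        exact PySem.List.pyRange_one_succ_right (by omega)
      unfold profits
      rw [show (((n + 1 : Nat) : Int)) = (n : Int) + 1 from by push_cast; ring,
        h, List.foldl_append]
      have ih' : (PySem.List.pyRange 1 ((n : Int) + 1) 1).foldl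
          (fun profit day =>
            if day < 14 then profit + 200
            else if 14 ≤ day ∧ day < 30 then profit + (200 + 50)
            else if 30 ≤ day ∧ day < 60 then profit + (200 + 80)
            else if day ≥ 60 then profit + (200 + 100)
            else profit) 0 = profits_alt (n : Int) := by
        have := ih; unfold profits at this; exact this
      rw [ih']
      simp only [List.foldl_cons, List.foldl_nil, profits_alt]
      split_ifs <;> omega

theorem profits_spec' : ∀ (days : Int), profits days = profits_alt days := by
  intro days
  by_cases h : 0 ≤ days
  · have : days = ((days.toNat : Nat) : Int) := by omega
    rw [this]; exact profits_nat days.toNat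
  · have h1 : PySem.List.pyRange 1 (days + 1) 1 = [] :=
      PySem.List.pyRange_one_eq_nil (by omega)
    simp [profits, profits_alt, h1]
    omega

-- ===== VERDICT (by name: the statement is the Claim_ definition above) =====
theorem profits_spec : Claim_equal_profits := by
  intro days _
  exact profits_spec' days
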